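-- pv_equiv track=rewrite | github.com/sowmyasunkara-knsass/codemind-python | DifferenceSum.py | differenceOfSum
-- ===== SOURCE A (Python) =====
-- from typing import List
--
-- def differenceOfSum(nums: List[int]) -> int:
--     ts = 0
--     ds = 0
--     for i in nums:
--         ts = ts+i
--         while(i!=0):
--             r = i%10
--             ds = ds+r
--             i = i//10
--     return ts-ds
-- ===== SOURCE B (Python) =====
-- def differenceOfSum(nums):
--     total = sum(nums)
--     digit_total = sum(int(c) for num in nums for c in str(num))
--     return total - digit_total
-- ===== Notes on version B (the rewrite author's own statement) =====
-- stated objective: idiomatic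
-- what changed: B computes the plain total with sum() and the digit total by iterating the decimal-string characters of each number, instead of A's nested while-loop digit peeling with %10 and //10; Pre_ excludes negative numbers, on which A loops forever (i//10 stabilises at -1) and B raises ValueError.
import Mathlib
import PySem

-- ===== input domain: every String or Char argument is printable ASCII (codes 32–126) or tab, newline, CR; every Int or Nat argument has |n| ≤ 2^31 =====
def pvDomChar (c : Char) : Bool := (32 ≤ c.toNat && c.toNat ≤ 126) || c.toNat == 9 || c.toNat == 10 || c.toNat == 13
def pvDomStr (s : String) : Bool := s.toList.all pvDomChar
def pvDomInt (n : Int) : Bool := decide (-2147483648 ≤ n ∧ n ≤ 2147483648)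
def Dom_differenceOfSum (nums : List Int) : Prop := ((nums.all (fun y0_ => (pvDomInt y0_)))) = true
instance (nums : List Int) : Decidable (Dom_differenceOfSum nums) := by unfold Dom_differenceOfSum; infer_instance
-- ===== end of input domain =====

-- B replaces A's nested while-loop digit peeling (%10, //10) by summing the decimal-string
-- characters of each number (idiomatic two-pass form); Pre_ excludes negative numbers,
-- on which Python A loops forever and B raises ValueError.


-- ===== PORT A =====
-- the inner 'while i != 0: r = i%10; ds += r; i = i//10', with a fuel guard for totality only
-- (on negative i the Python loop never terminates; such inputs are outside Pre_)
def pvDigitLoopA : Nat → Int → Int → Int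
  | 0, _, ds => ds
  | f + 1, i, ds =>
    if i = 0 then ds
    else pvDigitLoopA f (PySem.Int.floordiv i 10) (ds + PySem.Int.mod i 10)

def differenceOfSum (nums : List Int) : Int :=
  let p := nums.foldl (fun (p : Int × Int) i =>
    (p.1 + i, pvDigitLoopA (i.natAbs + 1) i p.2)) (0, 0)
  p.1 - p.2

-- ===== PORT B =====
-- 'int(c)' on a digit character of str(num) is its code minus 48 (exact for num ≥ 0; for
-- negative num Python B raises ValueError on '-', outside Pre_)
def differenceOfSum_alt (nums : List Int) : Int :=
  let total := nums.sum
  let digit_total :=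
    (nums.flatMap (fun num => (PySem.Int.toChars num).map (fun c => (c.toNat : Int) - 48))).sum
  total - digit_total

-- ===== PRECONDITION & SPEC =====
-- Pre_ excludes negative elements: there Python A never returns (i//10 stabilises at -1,
-- so the while-loop runs forever) and Python B raises ValueError.
def Pre_differenceOfSum (nums : List Int) : Prop := ∀ i ∈ nums, 0 ≤ i
instance (nums : List Int) : Decidable (Pre_differenceOfSum nums) := by unfold Pre_differenceOfSum; infer_instance
def pvWitness_differenceOfSum : List Int := [0, 7, 123]

def Spec_differenceOfSum (nums : List Int) (out : Int) : Prop := out = differenceOfSum_alt nums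
instance (nums : List Int) (out : Int) : Decidable (Spec_differenceOfSum nums out) := by unfold Spec_differenceOfSum; infer_instance

-- ===== CLAIM (what is proved, stated in full; the proofs are below) =====
def Claim_equal_differenceOfSum : Prop := ∀ (nums : List Int), Dom_differenceOfSum nums → Pre_differenceOfSum nums → Spec_differenceOfSum nums (differenceOfSum nums)

-- ===== LEMMAS AND PROOFS =====

-- digit sum of a natural number, the common value both sides compute
def pvDsum : Nat → Nat
  | 0 => 0
  | n + 1 => (n + 1) % 10 + pvDsum ((n + 1) / 10)
decreasing_by exact Nat.div_lt_self (Nat.succ_pos n) (by omega)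

lemma pvDsum_pos (n : Nat) (h : 0 < n) : pvDsum n = n % 10 + pvDsum (n / 10) := by
  cases n with
  | zero => omega
  | succ m => rw [pvDsum]

lemma pvDigitLoopA_eq (f : Nat) : ∀ (i ds : Int), 0 ≤ i → i.toNat < f →
    pvDigitLoopA f i ds = ds + (pvDsum i.toNat : Int) := by
  induction f with
  | zero => intro i ds _ h; omega
  | succ f ih =>
    intro i ds hi hf
    rw [pvDigitLoopA]
    by_cases h0 : i = 0
    · simp [h0, pvDsum]
    · rw [if_neg h0]
      have hpos : 0 < i := lt_of_le_of_ne hi (Ne.symm h0)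
      rw [PySem.Int.floordiv_eq_ediv_of_pos (by omega : (0:Int) < 10),
          PySem.Int.mod_eq_emod_of_pos (by omega : (0:Int) < 10)]
      have h1 : (i / 10).toNat = i.toNat / 10 := by omega
      have h2 : i % 10 = (i.toNat % 10 : Nat) := by omega
      rw [ih (i / 10) (ds + i % 10) (by positivity) (by omega)]
      rw [pvDsum_pos i.toNat (by omega), h1, h2]
      push_cast
      ring

lemma pvDigitChar_val (d : Nat) (h : d < 10) :
    ((Nat.digitChar d).toNat : Int) - 48 = (d : Int) := by
  interval_cases d <;> decide

-- value sum of Nat.toDigitsCore is the digit sum (fuel n < f suffices)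
lemma pvToDigitsCore_sum (f : Nat) : ∀ (n : Nat) (cs : List Char), n < f →
    ((Nat.toDigitsCore 10 f n cs).map (fun c => (c.toNat : Int) - 48)).sum
      = (pvDsum n : Int) + (cs.map (fun c => (c.toNat : Int) - 48)).sum := by
  induction f with
  | zero => intro n cs h; omega
  | succ f ih =>
    intro n cs hf
    rw [Nat.toDigitsCore]
    by_cases h0 : n / 10 = 0
    · simp only [h0, if_true]
      cases n with
      | zero => simp [pvDsum, pvDigitChar_val 0 (by omega)]
      | succ m =>
        rw [pvDsum_pos (m + 1) (by omega), h0]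
        simp [pvDigitChar_val ((m + 1) % 10) (Nat.mod_lt _ (by omega)), pvDsum]
    · rw [if_neg h0]
      have hn : 0 < n := by omega
      rw [ih (n / 10) _ (by omega)]
      rw [pvDsum_pos n hn]
      simp [pvDigitChar_val (n % 10) (Nat.mod_lt _ (by omega))]
      ring

lemma pvToChars_sum (i : Int) (hi : 0 ≤ i) :
    ((PySem.Int.toChars i).map (fun c => (c.toNat : Int) - 48)).sum = (pvDsum i.toNat : Int) := by
  rw [PySem.Int.toChars]
  rw [if_neg (by omega)]
  rw [Nat.toDigits]
  rw [pvToDigitsCore_sum (i.toNat + 1) i.toNat [] (by omega)]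
  simp

lemma pvFoldA (nums : List Int) : ∀ (ts ds : Int), (∀ i ∈ nums, 0 ≤ i) →
    nums.foldl (fun (p : Int × Int) i => (p.1 + i, pvDigitLoopA (i.natAbs + 1) i p.2)) (ts, ds)
      = (ts + nums.sum, ds + ((nums.map (fun i => (pvDsum i.toNat : Int))).sum)) := by
  induction nums with
  | nil => intro ts ds _; simp
  | cons x xs ih =>
    intro ts ds h
    have hx : 0 ≤ x := h x (by simp)
    simp only [List.foldl_cons]
    rw [pvDigitLoopA_eq (x.natAbs + 1) x ds hx (by omega)]
    rw [ih _ _ (fun i hi => h i (by simp [hi]))]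
    simp [List.sum_cons]
    constructor <;> ring

lemma pvFlatMapSum (nums : List Int) (h : ∀ i ∈ nums, 0 ≤ i) :
    (nums.flatMap (fun num => (PySem.Int.toChars num).map (fun c => (c.toNat : Int) - 48))).sum
      = (nums.map (fun i => (pvDsum i.toNat : Int))).sum := by
  induction nums with
  | nil => simp
  | cons x xs ih =>
    simp only [List.flatMap_cons, List.map_cons, List.sum_append, List.sum_cons]
    rw [pvToChars_sum x (h x (by simp)), ih (fun i hi => h i (by simp [hi]))]

-- ===== VERDICT (by name: the statement is the Claim_ definition above) =====
theorem differenceOfSum_spec : Claim_equal_differenceOfSum := by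
  intro nums _ hpre
  unfold Spec_differenceOfSum differenceOfSum differenceOfSum_alt
  rw [pvFoldA nums 0 0 hpre]
  simp only [zero_add]
  rw [pvFlatMapSum nums hpre]
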